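-- pv_equiv track=rewrite | github.com/dinacmistry/advent-of-code-2025 | day-7-laboratories.py | analyze_manifold
-- ===== SOURCE A (Python) =====
-- def analyze_manifold(manifold):
--
--     count_of_split_beams = 0
--
--     for n in range(len(manifold)):
--         if n > 1:
--             indices = []
--             start_index = 0
--
--             while True:
--                 try:
--                     # search from the starting index
--                     index = manifold[n].index("^", start_index)
--                     indices.append(index)
--
--                     # move the starting index ahead to find the next one
--                     start_index = index + 1
--
--                 except ValueError:
--                     # break out of the loop if "^" isn't found and ValueError
--                     # gets raised because the starting index is too high to
--                     # search the string in manifold[n]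
--                     break
--             splitter_spots = indices
--             # gets split
--             for index in indices:
--                 if manifold[n-1][index] == "|":
--                     count_of_split_beams += 1
--     return count_of_split_beams
-- ===== SOURCE B (Python) =====
-- def analyze_manifold(manifold):
--     count = 0
--     for n in range(2, len(manifold)):
--         prev = manifold[n - 1]
--         for i, ch in enumerate(manifold[n]):
--             if ch == "^" and prev[i] == "|":
--                 count += 1
--     return count
-- ===== Notes on version B (the rewrite author's own statement) =====
-- stated objective: simpler
-- what changed: B fuses A's two phases per row (build the list of '^' positions via a repeated try/except .index while-loop, then a second pass over that list checking the row above) into one direct enumerate scan of the row with no intermediate index list, and starts the range at 2 instead of guarding n > 1 inside the loop.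
-- outside the precondition, e.g. on analyze_manifold(['', '', '^']): A raises IndexError, B raises IndexError
import Mathlib
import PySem

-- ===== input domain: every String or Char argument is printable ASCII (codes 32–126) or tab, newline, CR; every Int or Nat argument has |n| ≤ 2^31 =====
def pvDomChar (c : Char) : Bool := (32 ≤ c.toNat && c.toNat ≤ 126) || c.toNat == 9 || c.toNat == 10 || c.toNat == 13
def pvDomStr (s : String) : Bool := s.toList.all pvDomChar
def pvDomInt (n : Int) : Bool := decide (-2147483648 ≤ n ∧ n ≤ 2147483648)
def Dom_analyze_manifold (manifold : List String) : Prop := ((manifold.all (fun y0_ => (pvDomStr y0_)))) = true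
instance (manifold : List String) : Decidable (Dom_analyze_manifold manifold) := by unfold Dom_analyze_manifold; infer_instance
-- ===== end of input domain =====

-- B fuses A's two phases per row (index-list build via repeated .index, then a second pass) into one enumerate scan; objective: simpler.

-- ===== PORT A =====
-- the try/except while-loop: s.index("^", start) = findFrom; ValueError (-1) breaks the loop
def pvCollect (s : List Char) : Nat → Int → List Int
  | 0, _ => []
  | fuel + 1, start =>
    let index := PySem.Chars.findFrom s ['^'] start
    if index = -1 then []
    else index :: pvCollect s fuel (index + 1)

def analyze_manifold (manifold : List String) : Int :=
  (PySem.List.pyRange 0 (manifold.length : Int)).foldl (fun count n =>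
    if n > 1 then
      let row := PySem.List.pyGetD manifold n ""
      let indices := pvCollect row.toList (row.toList.length + 1) 0
      indices.foldl (fun c index =>
        if PySem.Str.pyGet? (PySem.List.pyGetD manifold (n - 1) "") index = some '|' then c + 1
        else c) count
    else count) 0

-- ===== PORT B =====
def analyze_manifold_alt (manifold : List String) : Int :=
  (PySem.List.pyRange 2 (manifold.length : Int)).foldl (fun count n =>
    let prev := PySem.List.pyGetD manifold (n - 1) ""
    (PySem.List.enumerate (PySem.List.pyGetD manifold n "").toList 0).foldl
      (fun c p => if p.2 = '^' ∧ PySem.Str.pyGet? prev p.1 = some '|' then c + 1 else c)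
      count) 0

-- ===== PRECONDITION & SPEC =====
-- Pre_ excludes exactly the inputs where Python A raises IndexError: some row n ≥ 2 has a '^'
-- at a column i that is out of range for row n-1.
def Pre_analyze_manifold (manifold : List String) : Prop :=
  ∀ n, n < manifold.length → 2 ≤ n →
    ∀ i, i < (manifold.getD n "").toList.length →
      (manifold.getD n "").toList.getD i ' ' = '^' →
      i < (manifold.getD (n - 1) "").toList.length
instance (manifold : List String) : Decidable (Pre_analyze_manifold manifold) := by
  unfold Pre_analyze_manifold; infer_instance

def pvWitness_analyze_manifold : List String := ["|", "|", "^"]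

def Spec_analyze_manifold (manifold : List String) (out : Int) : Prop := out = analyze_manifold_alt manifold
instance (manifold : List String) (out : Int) : Decidable (Spec_analyze_manifold manifold out) := by unfold Spec_analyze_manifold; infer_instance

-- ===== CLAIM (what is proved, stated in full; the proofs are below) =====
def Claim_equal_analyze_manifold : Prop := ∀ (manifold : List String), Dom_analyze_manifold manifold → Pre_analyze_manifold manifold → Spec_analyze_manifold manifold (analyze_manifold manifold)

-- ===== LEMMAS AND PROOFS =====

-- positions of '^' in a character list (proof-side characterisation of pvCollect's result)
def pvPos : List Char → List Nat
  | [] => []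
  | c :: cs => if c = '^' then 0 :: (pvPos cs).map (· + 1) else (pvPos cs).map (· + 1)

theorem pvPos_nil_iff (cs : List Char) : pvPos cs = [] ↔ '^' ∉ cs := by
  induction cs with
  | nil => simp [pvPos]
  | cons c cs ih =>
    by_cases h : c = '^'
    · simp [pvPos, h]
    · simp [pvPos, h, ih]
      exact fun _ h' => h h'.symm

theorem pvPos_split (cs : List Char) (j : Nat) (hj : j < cs.length)
    (hc : cs.getD j ' ' = '^')
    (hmin : ∀ i, i < j → cs.getD i ' ' ≠ '^') :
    pvPos cs = j :: (pvPos (cs.drop (j + 1))).map (· + (j + 1)) := by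
  induction cs generalizing j with
  | nil => simp at hj
  | cons c cs ih =>
    cases j with
    | zero =>
      simp at hc
      simp [pvPos, hc]
    | succ j =>
      have hne : c ≠ '^' := by
        have := hmin 0 (by omega)
        simpa using this
      have : pvPos cs = j :: (pvPos (cs.drop (j + 1))).map (· + (j + 1)) := by
        apply ih j (by simpa using hj) (by simpa using hc)
        intro i hi
        have := hmin (i + 1) (by omega)
        simpa using this
      simp only [pvPos, if_neg hne, this, List.map_cons, List.map_map,
        List.drop_succ_cons]
      refine congrArg₂ List.cons (by omega) ?_
      apply List.map_congr_left
      intro a _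
      simp only [Function.comp]
      omega

theorem pvCollect_eq : ∀ (fuel : Nat) (cs : List Char) (k : Nat),
    k ≤ cs.length → cs.length + 1 - k ≤ fuel →
    pvCollect cs fuel (k : Int) = (pvPos (cs.drop k)).map (fun j => ((j + k : Nat) : Int)) := by
  intro fuel
  induction fuel with
  | zero => intro cs k hk hf; omega
  | succ fuel ih =>
    intro cs k hk hf
    rw [pvCollect]
    rw [PySem.Chars.findFrom_natCast cs ['^'] k hk]
    by_cases hfind : PySem.Chars.find (List.drop k cs) ['^'] = -1
    · rw [if_pos (by simp [hfind])]
      have : '^' ∉ List.drop k cs := by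
        have := (PySem.Chars.find_eq_neg_one_iff (List.drop k cs) ['^']).mp hfind
        intro hmem
        obtain ⟨u, v, huv⟩ := List.append_of_mem hmem
        exact this ⟨u, v, by simp [huv]⟩
      rw [((pvPos_nil_iff _).mpr this)]
      simp
    · set f := PySem.Chars.find (List.drop k cs) ['^'] with hf_def
      have hge : 0 ≤ f := by
        have := PySem.Chars.neg_one_le_find (List.drop k cs) ['^']
        omega
      obtain ⟨hpre, hminp⟩ := PySem.Chars.find_spec (s := List.drop k cs) (sub := ['^']) hge
      obtain ⟨j, hjf⟩ : ∃ j : Nat, (j : Int) = f := ⟨f.toNat, Int.toNat_of_nonneg hge⟩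
      have htn : f.toNat = j := by omega
      rw [htn] at hpre hminp
      obtain ⟨t, ht⟩ := hpre
      have hjlen : j < (List.drop k cs).length := by
        by_contra hcon
        have h0 : List.drop j (List.drop k cs) = [] := List.drop_eq_nil_of_le (by omega)
        rw [← ht] at h0
        simp at h0
      have hchar : (List.drop k cs).getD j ' ' = '^' := by
        have : (List.drop k cs).getD j ' ' = (List.drop j (List.drop k cs)).getD 0 ' ' := by
          simp [List.getD, List.getElem?_drop]
        rw [this, ← ht]
        simp
      have hmin' : ∀ i, i < j → (List.drop k cs).getD i ' ' ≠ '^' := by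
        intro i hi hcon
        apply hminp i hi
        have hilen : i < (List.drop k cs).length := by omega
        refine ⟨(List.drop (i + 1) (List.drop k cs)), ?_⟩
        have : (List.drop k cs).getD i ' ' = '^' := hcon
        have hget : (List.drop k cs)[i] = '^' := by
          rwa [List.getD_eq_getElem _ _ hilen] at this
        rw [List.singleton_append]
        rw [← List.getElem_cons_drop hilen, hget]
      simp only [if_neg hfind]
      rw [if_neg (show ¬((k : Int) + f = -1) by omega)]
      have hsplit := pvPos_split (List.drop k cs) j hjlen hchar hmin'
      rw [hsplit]
      have hkj : ((k : Int) + f) = ((j + k : Nat) : Int) := by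
        push_cast
        omega
      rw [hkj]
      have hrec : (((j + k : Nat) : Int) + 1) = (((k + j + 1 : Nat)) : Int) := by
        push_cast; omega
      rw [hrec, ih cs (k + j + 1) (by simp [List.length_drop] at hjlen; omega)
        (by omega)]
      have hdd : List.drop (j + 1) (List.drop k cs) = List.drop (k + j + 1) cs := by
        rw [List.drop_drop, ← Nat.add_assoc]
      rw [hdd]
      simp only [List.map_cons, List.map_map]
      refine congrArg₂ List.cons rfl ?_
      apply List.map_congr_left
      intro a _
      simp only [Function.comp]
      omega

theorem pvFold_pos_enum (g : Int → Prop) [DecidablePred g] :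
    ∀ (cs : List Char) (s : Nat) (acc : Int),
    ((pvPos cs).map (fun j => ((j + s : Nat) : Int))).foldl
        (fun c jj => if g jj then c + 1 else c) acc
      = (PySem.List.enumerate cs (s : Int)).foldl
        (fun c p => if p.2 = '^' ∧ g p.1 then c + 1 else c) acc := by
  intro cs
  induction cs with
  | nil => simp [pvPos, PySem.List.enumerate_nil]
  | cons c cs ih =>
    intro s acc
    rw [PySem.List.enumerate_cons]
    by_cases h : c = '^'
    · simp only [pvPos, if_pos h, List.map_cons, List.map_map, List.foldl_cons]
      rw [show ((s : Int) + 1) = ((s + 1 : Nat) : Int) by push_cast; ring]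
      rw [← ih (s + 1)]
      have hmf : ((pvPos cs).map ((fun j => ((j + s : Nat) : Int)) ∘ (· + 1)))
          = (pvPos cs).map (fun j => ((j + (s + 1) : Nat) : Int)) := by
        apply List.map_congr_left; intro a _; simp only [Function.comp]; omega
      rw [hmf]
      congr 1
      simp [h]
    · simp only [pvPos, if_neg h, List.map_map, List.foldl_cons]
      rw [show ((s : Int) + 1) = ((s + 1 : Nat) : Int) by push_cast; ring]
      rw [← ih (s + 1)]
      have hmf : ((pvPos cs).map ((fun j => ((j + s : Nat) : Int)) ∘ (· + 1)))
          = (pvPos cs).map (fun j => ((j + (s + 1) : Nat) : Int)) := by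
        apply List.map_congr_left; intro a _; simp only [Function.comp]; omega
      rw [hmf]
      congr 1
      simp [h]

theorem pvRow_eq (prev cur : String) (acc : Int) :
    (pvCollect cur.toList (cur.toList.length + 1) 0).foldl
        (fun c index => if PySem.Str.pyGet? prev index = some '|' then c + 1 else c) acc
      = (PySem.List.enumerate cur.toList 0).foldl
        (fun c p => if p.2 = '^' ∧ PySem.Str.pyGet? prev p.1 = some '|' then c + 1 else c) acc := by
  have h0 : (0 : Int) = ((0 : Nat) : Int) := by norm_num
  rw [h0, pvCollect_eq (cur.toList.length + 1) cur.toList 0 (by omega) (by omega)]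
  simp only [List.drop_zero]
  exact pvFold_pos_enum (fun jj => PySem.Str.pyGet? prev jj = some '|') cur.toList 0 acc

theorem analyze_manifold_eq_alt (manifold : List String) :
    analyze_manifold manifold = analyze_manifold_alt manifold := by
  unfold analyze_manifold analyze_manifold_alt
  by_cases h : 2 ≤ manifold.length
  · rw [PySem.List.pyRange_one_append 0 2 (manifold.length : Int) (by omega) (by exact_mod_cast h)]
    rw [List.foldl_append]
    have h01 : PySem.List.pyRange 0 2 = [0, 1] := by decide
    rw [h01]
    simp only [List.foldl_cons, List.foldl_nil]
    norm_num
    apply PySem.List.foldl_congr_mem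
    intro acc n hn
    have h2n : 2 ≤ n := ((PySem.List.mem_pyRange_one).mp hn).1
    rw [if_pos (by omega)]
    exact pvRow_eq _ _ acc
  · have h1 : PySem.List.pyRange 2 (manifold.length : Int) = [] := by
      apply PySem.List.pyRange_one_eq_nil; omega
    rw [h1]
    simp only [List.foldl_nil]
    interval_cases hl : manifold.length
    · rw [show ((0 : Nat) : Int) = 0 by norm_num, PySem.List.pyRange_one_eq_nil (by omega)]
      simp
    · rw [show ((1 : Nat) : Int) = 1 by norm_num]
      rw [PySem.List.pyRange_one_cons (by omega), PySem.List.pyRange_one_eq_nil (by omega)]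
      simp

-- ===== VERDICT (by name: the statement is the Claim_ definition above) =====
theorem analyze_manifold_spec : Claim_equal_analyze_manifold := by
  intro manifold _ _
  unfold Spec_analyze_manifold
  exact analyze_manifold_eq_alt manifold
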